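/-
  PURE ARITHMETIC OF THE RESIDUE REGION (no memory, no machine): what decode_residue, codebook_decode_deinterleave_repeat and the
  estimate loop of start_decoder would otherwise re-derive at every check site. Everything is over `Nat`, proved by `omega`
  plus two or three multiplication lemmas. Namespace `Vorbis.Res`.

      partRead b e ps A            PR(r, A) of INVARIANTS T1 / T3 = (min e A − min b A) / ps        (b e ps = begin end part_size)
      partRead_mono                T3's monotonicity: b ≤ e → A ≤ A' → PR(r, A) ≤ PR(r, A')          (needs R4)
      partRead_le                  PR(r, A) ≤ A                                                      (so part_read ≤ 8192)
      nRead_no_underflow           min b A ≤ min e A : the unsigned `limit_r_end − limit_r_begin` does not wrap (R4)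
      factK                        "fact K" of decode_residue: every offset z(pc) + part_size ≤ min(end, A) ≤ A
      actualEst / actualDec        A_i of the estimate (FIX 9) and the actual_size of decode_residue; actualDec_le_actualEst
      maxUpTo pr n                 P_n = max(0, max_{i < n} pr i): the running maximum of the estimate loop; le_maxUpTo, maxUpTo_le
      tempRequired C P b1          T1's value max(8·C·(P+1), 2·b1); classify_eq (the compiled form ((P+1)·C) << 3), no wrap, multiple of 8
      request_le / T3_request      T3: the request C·(8 + 8·part_read) of decode_residue is ≤ T1's value; mdct_request_le
      final_test                   ARENA-FIX 1: S + 1808 + tmr + 64 ≤ T gives, after vorbis_alloc (S += 1840), L − S ≥ tmr + 32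
      ceilDiv PRD W                KK = ⌈part_read / classwords⌉: the number of class words = of slots filled in pass 0
      WHead / WInner               D-15: pcount = min(class_set·W, part_read) at the `while` heads, pcount = class_set·W + i inside
                                   the i-loops; the transitions head → inner → head, and what the exits give (KK ≤ class_set)
      InterOK c p ch len           the drift-tolerant position invariant of codebook_decode_deinterleave_repeat and its
                                   POSTCONDITION: c < ch ∧ p·ch + c ≤ len·ch (pos ≤ len·ch, NOT pos + total_decode ≤ len·ch)
      InterOK.of_z / .step / .p_lt / clamp_*    how decode_residue sets it, how one element advances it, FIX 5 + FIX 10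
      DeintInv / DeintInner        the invariants of `while (total_decode > 0)` and of its two inner `for` loops; deint_measure
-/
import Vorbis.Fields
namespace Vorbis.Res

/-! ### PR(r, A): the number of partitions read -/

/-- **`PR(r, A)`** (INVARIANTS T1, T3; I4 §0): the number of partitions of a residue with `begin = b`, `end = e`,
`part_size = ps` inside a vector of `A` values: `(min(e, A) − min(b, A)) / ps`. The estimate loop of start_decoder computes it
with `A = A_i` (`actualEst`), decode_residue with `A = actual_size` (`actualDec`). -/
def partRead (b e ps A : Nat) : Nat := (min e A - min b A) / ps

/-- The definition, as a rewrite rule. -/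
theorem partRead_def (b e ps A : Nat) : partRead b e ps A = (min e A - min b A) / ps := id rfl

/-- With R4 (`begin ≤ end`) the unsigned subtraction `limit_r_end − limit_r_begin` does not wrap: `n_read ≥ 0`. -/
theorem nRead_no_underflow {b e : Nat} (A : Nat) (hbe : b ≤ e) : min b A ≤ min e A := by
  omega

/-- `n_read ≤ actual_size`. -/
theorem nRead_le (b e A : Nat) : min e A - min b A ≤ A := by
  omega

/-- **T3, the monotonicity of `part_read` in `actual_size`** (given R4 `begin ≤ end`): the map
`A ↦ min(end, A) − min(begin, A)` is 0, then `A − begin`, then `end − begin`. -/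
theorem partRead_mono {b e ps A A' : Nat} (hbe : b ≤ e) (hA : A ≤ A') : partRead b e ps A ≤ partRead b e ps A' := by
  unfold partRead
  apply Nat.div_le_div_right
  omega

/-- `part_read ≤ actual_size` (so `part_read ≤ 8192`, and `8·part_read` does not wrap). -/
theorem partRead_le (b e ps A : Nat) : partRead b e ps A ≤ A := by
  unfold partRead
  have h1 : (min e A - min b A) / ps ≤ min e A - min b A := Nat.div_le_self _ _
  have h2 := nRead_le b e A
  omega

/-- `part_read · part_size ≤ n_read`. -/
theorem partRead_mul_le (b e ps A : Nat) : partRead b e ps A * ps ≤ min e A - min b A := by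
  unfold partRead
  exact Nat.div_mul_le_self _ _

/-- **Fact K** (decode_residue; I4 §2.3, CONTRACTS decode_residue `defs`): for every partition number `pc < part_read` the
offset `z(pc) = begin + pc · part_size` satisfies `z + part_size ≤ min(end, A) ≤ A`, and `begin ≤ A`, `part_size ≤ A`.
`r->begin` is NOT clamped in the loops; this is why that is harmless. Needs R4 (`b ≤ e`); R5 (`1 ≤ ps`) is what makes
`part_read` finite in the machine (the `div` does not fault), it is not needed here. -/
theorem factK {b e ps A pc : Nat} (hbe : b ≤ e) (hpc : pc < partRead b e ps A) :
    b ≤ A ∧ ps ≤ A ∧ b + pc * ps + ps ≤ min e A ∧ b + partRead b e ps A * ps ≤ min e A ∧ min e A ≤ A := by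
  have h1 := partRead_mul_le b e ps A
  have h2 : (pc + 1) * ps ≤ partRead b e ps A * ps := Nat.mul_le_mul_right ps hpc
  have h3 : (pc + 1) * ps = pc * ps + ps := Nat.succ_mul pc ps
  have h4 : 1 * ps ≤ partRead b e ps A * ps := Nat.mul_le_mul_right ps (by omega)
  have hps : ps = 0 ∨ 1 ≤ ps := by omega
  cases hps with
  | inl h0 =>
    -- `part_size = 0` is excluded by `pc < part_read`: a division by 0 is 0 in Lean
    subst h0
    unfold partRead at hpc
    rw [Nat.div_zero] at hpc
    omega
  | inr hps1 =>
    omega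

/-- Fact K, the form the call of `residue_decode` uses: `offset + n ≤ actual_size` with `offset = z(pc)`, `n = part_size`. -/
theorem factK_offset {b e ps A pc : Nat} (hbe : b ≤ e) (hpc : pc < partRead b e ps A) : b + pc * ps + ps ≤ A := by
  have h := factK hbe hpc
  omega

/-- Fact K for the `b < 0` arm of path A: `z + part_size ≤ A` is the new position, still `≤ A`. (The same inequality as
`factK_offset`; stated for the name.) -/
theorem factK_next {b e ps A pc : Nat} (hbe : b ≤ e) (hpc : pc < partRead b e ps A) : b + pc * ps + ps ≤ A :=
  factK_offset hbe hpc

/-- `part_read ≥ 1` needs `1 ≤ part_size ≤ n_read`: used to see that the 32-bit products `pcount · part_size` are exact. -/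
theorem mul_partSize_le {b e ps A pc : Nat} (hbe : b ≤ e) (hpc : pc < partRead b e ps A) : pc * ps ≤ A := by
  have h := factK hbe hpc
  omega

/-! ### actual_size: the estimate's (FIX 9) and decode_residue's -/

/-- `A_i` of T1 (FIX 9): `residue_types[i] == 2 ? blocksize_1 : blocksize_1 / 2`. -/
def actualEst (rtype b1 : Nat) : Nat := if rtype = 2 then b1 else b1 / 2

/-- decode_residue's `actual_size = rtype == 2 ? n*2 : n`. -/
def actualDec (rtype n : Nat) : Nat := if rtype = 2 then 2 * n else n

/-- The definition, as a rewrite rule. -/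
theorem actualEst_def (rtype b1 : Nat) : actualEst rtype b1 = if rtype = 2 then b1 else b1 / 2 := id rfl
/-- The definition, as a rewrite rule. -/
theorem actualDec_def (rtype n : Nat) : actualDec rtype n = if rtype = 2 then 2 * n else n := id rfl

/-- decode_residue is called with `n ∈ {b0/2, b1/2}`, hence `2·n ≤ b1`: its actual_size is at most the estimate's. -/
theorem actualDec_le_actualEst {rtype n b1 : Nat} (hn : 2 * n ≤ b1) : actualDec rtype n ≤ actualEst rtype b1 := by
  unfold actualDec actualEst
  split <;> omega

/-- `actual_size ≤ 2·n`: with `2·n ≤ blocksize_1` every offset of fact K is inside a `4·blocksize_1`-byte channel buffer. -/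
theorem actualDec_le (rtype n : Nat) : actualDec rtype n ≤ 2 * n := by
  unfold actualDec
  split <;> omega

/-- `n ≤ actual_size`. -/
theorem le_actualDec (rtype n : Nat) : n ≤ actualDec rtype n := by
  unfold actualDec
  split <;> omega

/-- Half a block: `n = b/2` with `b ≤ b1` gives the `2·n ≤ b1` that the lemmas above ask for. -/
theorem two_mul_half_le {b b1 : Nat} (h : b ≤ b1) : 2 * (b / 2) ≤ b1 := by
  omega

/-! ### The running maximum of the estimate loop, T1's value, T3 -/

/-- `P_n = max(0, max_{i < n} pr i)`: the value of `max_part_read` at the head of the estimate loop (start_decoder 4189) with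
counter `n`; `P = maxUpTo pr residue_count`. -/
def maxUpTo (pr : Nat → Nat) : Nat → Nat
  | 0 => 0
  | n + 1 => max (maxUpTo pr n) (pr n)

/-- Before the loop. -/
theorem maxUpTo_zero (pr : Nat → Nat) : maxUpTo pr 0 = 0 := id rfl

/-- One iteration: `if (part_read > max_part_read) max_part_read = part_read`. -/
theorem maxUpTo_succ (pr : Nat → Nat) (n : Nat) : maxUpTo pr (n + 1) = max (maxUpTo pr n) (pr n) := id rfl

/-- Every term is below the maximum. -/
theorem le_maxUpTo (pr : Nat → Nat) {i n : Nat} (h : i < n) : pr i ≤ maxUpTo pr n := by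
  induction n with
  | zero => omega
  | succ n ih =>
    rw [maxUpTo_succ]
    by_cases hi : i < n
    · have := ih hi
      omega
    · have e : i = n := by omega
      subst e
      omega

/-- A common bound of the terms bounds the maximum (`P ≤ 8192`). -/
theorem maxUpTo_le (pr : Nat → Nat) (n bound : Nat) (h : ∀ i, i < n → pr i ≤ bound) : maxUpTo pr n ≤ bound := by
  induction n with
  | zero =>
    rw [maxUpTo_zero]
    omega
  | succ n ih =>
    rw [maxUpTo_succ]
    have h1 := ih (fun i hi => h i (by omega))
    have h2 := h n (by omega)
    omega

/-- The maximum depends only on the terms below `n`. -/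
theorem maxUpTo_congr (pr pr' : Nat → Nat) (n : Nat) (h : ∀ i, i < n → pr' i = pr i) : maxUpTo pr' n = maxUpTo pr n := by
  induction n with
  | zero => rfl
  | succ n ih =>
    rw [maxUpTo_succ, maxUpTo_succ, ih (fun i hi => h i (by omega)), h n (by omega)]

/-- **T1's value**: `temp_memory_required = max(classify_mem, imdct_mem) = max(8·C·(P+1), 2·b1)`. -/
def tempRequired (C P b1 : Nat) : Nat := max (8 * C * (P + 1)) (2 * b1)

/-- The definition, as a rewrite rule. -/
theorem tempRequired_def (C P b1 : Nat) : tempRequired C P b1 = max (8 * C * (P + 1)) (2 * b1) := id rfl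

/-- The compiled form of `classify_mem`: `((P+1)·C) << 3` (start_decoder.R17: `imul r14d,[f+4] ; shl r14d,3`). -/
theorem classify_eq (C P : Nat) : (P + 1) * C * 8 = 8 * C * (P + 1) := by
  rw [Nat.mul_comm (P + 1) C, Nat.mul_comm (C * (P + 1)) 8, Nat.mul_assoc]

/-- No 32-bit wrap in `classify_mem`: `C ≤ 16`, `P ≤ 8192` give at most 1 048 704. -/
theorem classify_le {C P : Nat} (hC : C ≤ 16) (hP : P ≤ 8192) : 8 * C * (P + 1) ≤ 1048704 := by
  have h1 : 8 * C ≤ 128 := by omega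
  have h2 : 8 * C * (P + 1) ≤ 128 * 8193 := Nat.mul_le_mul h1 (by omega)
  omega

/-- T1's value fits 32 bits with room: at most 1 048 704. -/
theorem tempRequired_le {C P b1 : Nat} (hC : C ≤ 16) (hP : P ≤ 8192) (hb : b1 ≤ 8192) : tempRequired C P b1 ≤ 1048704 := by
  have h := classify_le hC hP
  unfold tempRequired
  omega

/-- T1's value is a multiple of 8 (ADO asks `tmr % 8 = 0`): `blocksize_1` is a multiple of 4. -/
theorem tempRequired_mod8 (C P b1 : Nat) (hb : b1 % 4 = 0) : tempRequired C P b1 % 8 = 0 := by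
  have h1 : 8 * C * (P + 1) % 8 = 0 := by
    rw [Nat.mul_assoc]
    exact Nat.mul_mod_right 8 _
  unfold tempRequired
  omega

/-- The two forms of decode_residue's request: `C·(8 + 8·part_read)` (the C text: `channels * (sizeof(void*) + part_read *
sizeof(uint8*))`) and `((part_read+1)·C)·8` (the machine: `imul ebx,r12d ; lea esi,[rbx*8]`). -/
theorem request_eq (C pr : Nat) : (pr + 1) * C * 8 = C * (8 + 8 * pr) := by
  rw [classify_eq, Nat.mul_comm 8 C, Nat.mul_assoc, Nat.mul_add, Nat.mul_one, Nat.add_comm]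

/-- The request is a multiple of 8, so `r8 sz = sz` in `temp_alloc_ok`. -/
theorem request_mod8 (C pr : Nat) : C * (8 + 8 * pr) % 8 = 0 := by
  rw [← request_eq]
  exact Nat.mul_mod_left _ 8

/-- **T3, decode_residue's request**: with `part_read ≤ P` the request is at most T1's value. -/
theorem request_le {C P b1 pr : Nat} (h : pr ≤ P) : C * (8 + 8 * pr) ≤ tempRequired C P b1 := by
  have h1 : 8 * C * (pr + 1) ≤ 8 * C * (P + 1) := Nat.mul_le_mul_left _ (by omega)
  have h2 := request_eq C pr
  have h3 := classify_eq C pr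
  unfold tempRequired
  omega

/-- **T3, inverse_mdct's request**: `2·n` bytes with `n ≤ blocksize_1`. -/
theorem mdct_request_le {C P b1 n : Nat} (h : n ≤ b1) : 2 * n ≤ tempRequired C P b1 := by
  unfold tempRequired
  omega

/-- **T3 assembled over numbers**: residues `i < rc` with `begin i ≤ end i` (R4), types `ty i`; decode_residue is entered with
`rn < rc` and `2·n ≤ b1`; its `part_read` is computed with `actualDec`, the estimate's with `actualEst` (FIX 9). Then the
request `C·(8 + 8·part_read)` is at most T1's value. -/
theorem T3_request {C b1 rc rn n : Nat} (beg en ps ty : Nat → Nat) (hrn : rn < rc) (hbe : beg rn ≤ en rn)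
    (hn : 2 * n ≤ b1) :
    C * (8 + 8 * partRead (beg rn) (en rn) (ps rn) (actualDec (ty rn) n))
      ≤ tempRequired C (maxUpTo (fun i => partRead (beg i) (en i) (ps i) (actualEst (ty i) b1)) rc) b1 := by
  apply request_le
  have h1 : partRead (beg rn) (en rn) (ps rn) (actualDec (ty rn) n)
      ≤ partRead (beg rn) (en rn) (ps rn) (actualEst (ty rn) b1) :=
    partRead_mono hbe (actualDec_le_actualEst hn)
  have h2 := le_maxUpTo (fun i => partRead (beg i) (en i) (ps i) (actualEst (ty i) b1)) hrn
  exact Nat.le_trans h1 h2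

/-- **ARENA-FIX 1, the final test of start_decoder** (`setup_offset + sizeof(*f) + temp_memory_required + 2*ARENA_REDZONE >
temp_offset` → outofmem): when it passes, after `vorbis_alloc` (`S' = S + 32 + 1808`) there is room for one temp block of
`tmr` bytes and its red zone: ADO's `L − S' ≥ tmr + 32`. -/
theorem final_test {S T tmr : Nat} (h : S + 1808 + tmr + 64 ≤ T) : tmr + 32 ≤ T - (S + 1840) ∧ S + 1840 ≤ T := by
  omega

/-! ### D-15: the exact relation between pcount and class_set (WA / WB) -/

/-- `KK = ⌈part_read / classwords⌉`: the number of class words of a pass = the number of slots of a row of `part_classdata`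
that pass 0 fills. -/
def ceilDiv (PRD W : Nat) : Nat := (PRD + W - 1) / W

/-- The definition, as a rewrite rule. -/
theorem ceilDiv_def (PRD W : Nat) : ceilDiv PRD W = (PRD + W - 1) / W := id rfl

/-- A class word that starts before the end is one of the `KK`. -/
theorem lt_ceilDiv {PRD W cs : Nat} (hW : 1 ≤ W) (h : cs * W < PRD) : cs < ceilDiv PRD W := by
  unfold ceilDiv
  have e : (cs + 1) * W = cs * W + W := Nat.succ_mul cs W
  have h2 : (cs + 1) * W ≤ PRD + W - 1 := by omega
  exact (Nat.le_div_iff_mul_le (by omega)).mpr h2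

/-- When the class words have covered everything, there were at least `KK` of them. -/
theorem ceilDiv_le {PRD W cs : Nat} (hW : 1 ≤ W) (h : PRD ≤ cs * W) : ceilDiv PRD W ≤ cs := by
  unfold ceilDiv
  have e : (cs + 1) * W = cs * W + W := Nat.succ_mul cs W
  have h2 : PRD + W - 1 < (cs + 1) * W := by omega
  have h3 : (PRD + W - 1) / W < cs + 1 := (Nat.div_lt_iff_lt_mul (by omega)).mpr h2
  omega

/-- `KK ≤ part_read` (R7b): every slot index `< KK` is inside the row of `part_read` slots. -/
theorem ceilDiv_le_self {PRD W : Nat} (hW : 1 ≤ W) : ceilDiv PRD W ≤ PRD := by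
  apply ceilDiv_le hW
  have h : PRD * 1 ≤ PRD * W := Nat.mul_le_mul_left PRD hW
  omega

/-- `class_set < part_read` at a class word that starts before the end (R7b): the slot `part_classdata[j][class_set]` exists. -/
theorem classSet_lt {PRD W cs : Nat} (hW : 1 ≤ W) (h : cs * W < PRD) : cs < PRD := by
  have h1 : cs * 1 ≤ cs * W := Nat.mul_le_mul_left cs hW
  omega

/-- **WA / WB at a `while (pcount < part_read)` head** (DECISIONS D-15): the EXACT relation `pcount = min(class_set·W,
part_read)`. The weaker `class_set ≤ pcount ≤ part_read` bounds the slot address but not its content in passes ≥ 1. -/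
def WHead (W PRD cs pcount : Nat) : Prop := pcount = min (cs * W) PRD

/-- **Inside the i-loop** `for (i=0; i < classwords && pcount < part_read; ++i, ++pcount)`: `pcount = class_set·W + i`, and the
class word started before the end. -/
structure WInner (W PRD cs i pcount : Nat) : Prop where
  pcount_eq : pcount = cs * W + i
  i_le : i ≤ W
  pcount_le : pcount ≤ PRD
  start_lt : cs * W < PRD

/-- Loop entry: `pcount = class_set = 0`. -/
theorem WHead.init (W PRD : Nat) : WHead W PRD 0 0 := by
  unfold WHead
  omega

/-- At a head with `pcount < part_read` the class word starts at `pcount` exactly, before the end. -/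
theorem WHead.start {W PRD cs pcount : Nat} (h : WHead W PRD cs pcount) (hlt : pcount < PRD) :
    pcount = cs * W ∧ cs * W < PRD := by
  unfold WHead at h
  omega

/-- Head → i-loop with `i = 0` (the loop body is entered: `pcount < part_read`). -/
theorem WHead.enter {W PRD cs pcount : Nat} (h : WHead W PRD cs pcount) (hlt : pcount < PRD) : WInner W PRD cs 0 pcount := by
  have hs := h.start hlt
  exact ⟨by omega, by omega, by omega, hs.2⟩

/-- At such a head the slot `class_set` exists and is one of the `KK` that pass 0 fills. -/
theorem WHead.slot {W PRD cs pcount : Nat} (h : WHead W PRD cs pcount) (hW : 1 ≤ W) (hlt : pcount < PRD) :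
    cs < ceilDiv PRD W ∧ cs < PRD := by
  have hs := h.start hlt
  exact ⟨lt_ceilDiv hW hs.2, classSet_lt hW hs.2⟩

/-- The loop is left (`pcount ≥ part_read`): `pcount = part_read`, and at least `KK` class words were seen: pass 0 has filled
every slot that the passes ≥ 1 read. -/
theorem WHead.exit {W PRD cs pcount : Nat} (h : WHead W PRD cs pcount) (hW : 1 ≤ W) (hge : PRD ≤ pcount) :
    pcount = PRD ∧ ceilDiv PRD W ≤ cs := by
  unfold WHead at h
  have h1 : PRD ≤ cs * W := by omega
  exact ⟨by omega, ceilDiv_le hW h1⟩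

/-- The slot of the i-loop exists and is one of the `KK`. -/
theorem WInner.slot {W PRD cs i pcount : Nat} (h : WInner W PRD cs i pcount) (hW : 1 ≤ W) :
    cs < ceilDiv PRD W ∧ cs < PRD :=
  ⟨lt_ceilDiv hW h.start_lt, classSet_lt hW h.start_lt⟩

/-- One turn of the i-loop (its condition `i < classwords && pcount < part_read` held): `++i, ++pcount`. -/
theorem WInner.step {W PRD cs i pcount : Nat} (h : WInner W PRD cs i pcount) (hi : i < W) (hp : pcount < PRD) :
    WInner W PRD cs (i + 1) (pcount + 1) := by
  have h1 := h.pcount_eq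
  exact ⟨by omega, by omega, by omega, h.start_lt⟩

/-- The i-loop is left (`i ≥ classwords` or `pcount ≥ part_read`), then `++class_set`: the head relation again. -/
theorem WInner.leave {W PRD cs i pcount : Nat} (h : WInner W PRD cs i pcount) (hex : W ≤ i ∨ PRD ≤ pcount) :
    WHead W PRD (cs + 1) pcount := by
  have h1 := h.pcount_eq
  have h2 := h.i_le
  have h3 := h.pcount_le
  have e : (cs + 1) * W = cs * W + W := Nat.succ_mul cs W
  unfold WHead
  omega

/-- The measure `part_read − pcount` of a `while` decreases strictly (R7b): the i-loop runs at least once. -/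
theorem WInner.progress {W PRD cs i pcount pcount0 : Nat} (h0 : WHead W PRD cs pcount0) (hlt : pcount0 < PRD)
    (h : WInner W PRD cs i pcount) (hW : 1 ≤ W) (hex : W ≤ i ∨ PRD ≤ pcount) : pcount0 < pcount := by
  have hs := h0.start hlt
  have h1 := h.pcount_eq
  omega

/-- Inside the i-loop the partition number is below `part_read` (so fact K applies to `z(pcount)`). -/
theorem WInner.pcount_lt {W PRD cs i pcount : Nat} (_h : WInner W PRD cs i pcount) (hp : pcount < PRD) : pcount < PRD := hp

/-! ### The position invariant of codebook_decode_deinterleave_repeat, and its postcondition -/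

/-- **CI, the drift-tolerant position invariant** (I4 §2.4, H-I4-1, DECISIONS D-5): `0 ≤ c_inter < ch`, `0 ≤ p_inter`,
`pos := p_inter·ch + c_inter ≤ len·ch`. It is the PRECONDITION of codebook_decode_deinterleave_repeat (with `total_decode ≥ 1`),
its loop invariant, and its POSTCONDITION on a result 1 about the two stored ints (`*c_inter_p`, `*p_inter_p`): decode_residue
needs the latter for the next call inside the same class word (C's gap 8). NOT `pos + total_decode ≤ len·ch`: the position
drifts inside a class word (witness drift.ogg). Over numbers; the values are non-negative ints. -/
structure InterOK (c p ch len : Nat) : Prop where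
  c_lt : c < ch
  pos_le : p * ch + c ≤ len * ch

/-- `len·ch ≤ 65536`: none of the 32-bit products and sums of the clamp wraps (`pos + effective ≤ 65536 + 65535`). -/
theorem len_mul_ch_le {len ch : Nat} (hlen : len ≤ 4096) (hch : ch ≤ 16) : len * ch ≤ 65536 := by
  have h := Nat.mul_le_mul hlen hch
  omega

/-- decode_residue sets `c_inter = z % ch`, `p_inter = z / ch` (for `ch = 2`: `z & 1`, `z >> 1`) from an offset `z ≤ len·ch`. -/
theorem InterOK.of_z {z ch len : Nat} (hch : 1 ≤ ch) (hz : z ≤ len * ch) : InterOK (z % ch) (z / ch) ch len := by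
  constructor
  · exact Nat.mod_lt z (by omega)
  · have h := Nat.div_add_mod z ch
    rw [Nat.mul_comm ch (z / ch)] at h
    omega

/-- The position so set IS `z`. -/
theorem pos_of_z (z ch : Nat) : z / ch * ch + z % ch = z := by
  have h := Nat.div_add_mod z ch
  rw [Nat.mul_comm ch (z / ch)] at h
  exact h

/-- The `ch = 2` form: `z & 1` and `z >> 1`. -/
theorem InterOK.of_z2 {z len : Nat} (hz : z ≤ len * 2) : InterOK (z &&& 1) (z >>> 1) 2 len := by
  have e1 : z &&& 1 = z % 2 := Nat.and_one_is_mod z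
  have e2 : z >>> 1 = z / 2 := by
    rw [Nat.shiftRight_eq_div_pow]
  rw [e1, e2]
  exact InterOK.of_z (by omega) hz

/-- What decode_residue supplies at the head of a `while` and in the `b < 0` arm (path A: `rtype = 2`, `ch ≥ 2`,
`actual_size = 2·n`): an offset `z ≤ actual_size` is a position `≤ n·ch`. -/
theorem z_le_len_mul_ch {z n ch : Nat} (hz : z ≤ 2 * n) (hch : 2 ≤ ch) : z ≤ n * ch := by
  have h : n * 2 ≤ n * ch := Nat.mul_le_mul_left n hch
  omega

/-- `p_inter ≤ len`. -/
theorem InterOK.p_le {c p ch len : Nat} (h : InterOK c p ch len) : p ≤ len := by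
  have h1 := h.c_lt
  have h2 := h.pos_le
  have hch : 0 < ch := by omega
  apply Nat.le_of_mul_le_mul_right _ hch
  omega

/-- **A store position is inside the buffers**: while an element is still to be written (`pos < len·ch`), `p_inter < len`,
so `outputs[c_inter][p_inter]` is one of the `len` floats (and `c_inter < ch` one of the `ch` pointers). -/
theorem InterOK.p_lt {c p ch len : Nat} (hc : c < ch) (hpos : p * ch + c < len * ch) : p < len := by
  have hch : 0 < ch := by omega
  apply Nat.lt_of_mul_lt_mul_right (a := ch)
  omega

/-- **One element**: `if (++c_inter == ch) { c_inter = 0; ++p_inter; }` advances the position by exactly 1. -/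
theorem InterOK.step {c p ch : Nat} (hc : c < ch) :
    (if c + 1 = ch then p + 1 else p) * ch + (if c + 1 = ch then 0 else c + 1) = p * ch + c + 1
      ∧ (if c + 1 = ch then 0 else c + 1) < ch := by
  by_cases h : c + 1 = ch
  · rw [if_pos h, if_pos h]
    have e : (p + 1) * ch = p * ch + ch := Nat.succ_mul p ch
    omega
  · rw [if_neg h, if_neg h]
    omega

/-- After an element written at a position `< len·ch`, CI holds again. -/
theorem InterOK.next {c p ch len : Nat} (hc : c < ch) (hpos : p * ch + c < len * ch) :
    InterOK (if c + 1 = ch then 0 else c + 1) (if c + 1 = ch then p + 1 else p) ch len := by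
  have h := InterOK.step (p := p) hc
  exact ⟨h.2, by omega⟩

/-- **The clamp with FIX 5 and FIX 10**: `if (pos + effective > len·ch) { effective = len·ch − pos; if (effective <= 0) return
FALSE; }`. When the function goes on, `1 ≤ effective' ≤ effective` and `pos + effective' ≤ len·ch`: every one of the
`effective'` elements is written at a position `< len·ch`, and `total_decode` drops by at least 1. -/
theorem clamp_ok {pos eff L : Nat} (hpos : pos ≤ L) (heff : 1 ≤ eff)
    (hgo : ¬ (L < pos + eff ∧ L - pos = 0)) :
    let eff' := if L < pos + eff then L - pos else eff
    1 ≤ eff' ∧ eff' ≤ eff ∧ pos + eff' ≤ L := by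
  intro eff'
  by_cases h : L < pos + eff
  · have e : eff' = L - pos := if_pos h
    omega
  · have e : eff' = eff := if_neg h
    omega

/-- FIX 10 fires exactly when the position has reached the end: `pos = len·ch` (with `pos ≤ len·ch`, `effective ≥ 1`). -/
theorem clamp_return_iff {pos eff L : Nat} (hpos : pos ≤ L) (heff : 1 ≤ eff) :
    (L < pos + eff ∧ L - pos = 0) ↔ pos = L := by
  omega

/-- The i-th element of a round of `effective` elements starting at `pos0` is written at a position `< len·ch`. -/
theorem round_pos_lt {pos0 eff L i : Nat} (h : pos0 + eff ≤ L) (hi : i < eff) : pos0 + i < L := by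
  omega

/-- **The invariant of `while (total_decode > 0)` at its head** (codebook_decode_deinterleave_repeat, loop 1901), over the local
copies: CI, and `1 ≤ effective ≤ dimensions` (`effective` starts as `dimensions ≥ 1` (K1 / FIX 6), only shrinks, and FIX 10 returns
before it could become `≤ 0`). Measure: `total_decode`. -/
structure DeintInv (c p ch len eff dim : Nat) : Prop where
  inter : InterOK c p ch len
  eff_pos : 1 ≤ eff
  eff_le : eff ≤ dim

/-- Function entry: CI from the precondition, `effective = c->dimensions`. -/
theorem DeintInv.init {c p ch len dim : Nat} (h : InterOK c p ch len) (hd : 1 ≤ dim) : DeintInv c p ch len dim dim :=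
  ⟨h, hd, by omega⟩

/-- **The invariant of the two `for (i=0; i < effective; ++i)` loops** (1938, 1946): `i` elements of the round written, the
position is `pos0 + i`, and the whole round fits: `pos0 + effective ≤ len·ch` (the clamp). -/
structure DeintInner (c p ch len pos0 eff i : Nat) : Prop where
  c_lt : c < ch
  pos_eq : p * ch + c = pos0 + i
  i_le : i ≤ eff
  room : pos0 + eff ≤ len * ch

/-- After the clamp (`clamp_ok`), `i = 0`. -/
theorem DeintInner.init {c p ch len eff : Nat} (h : InterOK c p ch len) (hroom : p * ch + c + eff ≤ len * ch) :
    DeintInner c p ch len (p * ch + c) eff 0 :=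
  ⟨h.c_lt, by omega, by omega, hroom⟩

/-- **The store of the inner loop is inside the buffers**: `c_inter < ch` (the pointer `outputs[c_inter]`, one of `ch`) and
`p_inter < len` (the float `outputs[c_inter][p_inter]`, one of `len`). -/
theorem DeintInner.store_ok {c p ch len pos0 eff i : Nat} (h : DeintInner c p ch len pos0 eff i) (hi : i < eff) :
    c < ch ∧ p < len := by
  have h1 := h.pos_eq
  have h2 := h.room
  exact ⟨h.c_lt, InterOK.p_lt h.c_lt (by omega)⟩

/-- One element written, `if (++c_inter == ch) { c_inter = 0; ++p_inter; }`, `++i`. -/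
theorem DeintInner.step {c p ch len pos0 eff i : Nat} (h : DeintInner c p ch len pos0 eff i) (hi : i < eff) :
    DeintInner (if c + 1 = ch then 0 else c + 1) (if c + 1 = ch then p + 1 else p) ch len pos0 eff (i + 1) := by
  have hs := InterOK.step (p := p) h.c_lt
  have h1 := h.pos_eq
  exact ⟨hs.2, by omega, by omega, h.room⟩

/-- **The round is over** (`i = effective`), `total_decode -= effective`: the head invariant again, with the position advanced
by `effective ≥ 1`; still `pos ≤ len·ch`. -/
theorem DeintInner.done {c p ch len pos0 eff dim : Nat} (h : DeintInner c p ch len pos0 eff eff) (he : 1 ≤ eff)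
    (hd : eff ≤ dim) : DeintInv c p ch len eff dim := by
  have h1 := h.pos_eq
  have h2 := h.room
  exact ⟨⟨h.c_lt, by omega⟩, he, hd⟩

/-- The measure: `total_decode` drops by `effective ≥ 1` per round (as ints: `total_decode > 0` at the head). -/
theorem deint_measure {total eff : Int} (ht : 0 < total) (he : 1 ≤ eff) : (total - eff).toNat < total.toNat := by
  omega

/-- The index into `multiplicands`: entry `z < N`, element `i < effective ≤ dimensions`: `z·dim + i < N·dim` (K6's block). -/
theorem mult_index_lt {z N dim i : Nat} (hz : z < N) (hi : i < dim) : z * dim + i < N * dim := by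
  have h1 : (z + 1) * dim ≤ N * dim := Nat.mul_le_mul_right dim hz
  have e : (z + 1) * dim = z * dim + dim := Nat.succ_mul z dim
  omega

end Vorbis.Res
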